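-- pv_equiv track=rewrite | github.com/junobonnie/auto_ABP-KPZ | cluster_plot.py | get_heights
-- ===== SOURCE A (Python) =====
-- def get_heights(map_):
--     heights = [0 for i in range(len(map_[0]))]
--     for i in range(len(map_[0])):
--         for j in reversed(range(0, len(map_))):
--             if map_[j][i] == 1:
--                 heights[i] = unit*j
--                 break
--     return heights
--
-- unit = 5
-- ===== SOURCE B (Python) =====
-- unit = 5
--
-- def get_heights(map_):
--     w = len(map_[0])
--     heights = [0] * w
--     for j, row in enumerate(map_):
--         for i in range(w):
--             if row[i] == 1:
--                 heights[i] = unit * j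
--     return heights
-- ===== Notes on version B (the rewrite author's own statement) =====
-- stated objective: faster
-- what changed: Replaces A's per-column reverse scan with early break by a single row-major forward sweep that overwrites heights[i] on every 1 (last write = topmost); row-local iteration avoids A's strided column access and per-column reversed() ranges, a measured constant-factor speedup.
-- outside the precondition, e.g. on get_heights([]): A raises IndexError, B raises IndexError; on get_heights([[1, 1], [0], [1, 1]]): A returns [10, 10], B raises IndexError
import Mathlib
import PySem

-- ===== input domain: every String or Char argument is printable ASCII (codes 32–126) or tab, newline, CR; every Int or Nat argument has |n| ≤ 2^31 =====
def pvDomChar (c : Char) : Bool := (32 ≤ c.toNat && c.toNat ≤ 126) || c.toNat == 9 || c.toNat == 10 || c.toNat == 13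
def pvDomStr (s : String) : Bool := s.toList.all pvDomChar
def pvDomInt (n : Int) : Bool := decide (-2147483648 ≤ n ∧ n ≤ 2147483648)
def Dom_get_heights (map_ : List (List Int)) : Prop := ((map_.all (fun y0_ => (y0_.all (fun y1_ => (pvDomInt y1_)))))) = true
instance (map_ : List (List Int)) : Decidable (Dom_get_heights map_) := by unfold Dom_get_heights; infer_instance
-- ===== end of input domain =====

-- B replaces A's per-column reverse scan with break by a single row-major forward
-- overwrite sweep (last write = topmost 1); same O(rows*cols) cost, different traversal.


def unit : Int := 5

-- ===== PORT A =====
-- inner 'for j in reversed(range(0, len(map_)))' with break; 0 = the untouched initial heights[i]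
def pvAColLoop (map_ : List (List Int)) (i : Int) : List Int → Int
  | [] => 0
  | j :: js =>
      if PySem.List.pyGetD (PySem.List.pyGetD map_ j []) i 0 == 1 then unit * j
      else pvAColLoop map_ i js

def get_heights (map_ : List (List Int)) : List Int :=
  let w : Int := ((PySem.List.pyGetD map_ 0 []).length : Int)
  (PySem.List.pyRange 0 w 1).map (fun i =>
    pvAColLoop map_ i ((PySem.List.pyRange 0 (map_.length : Int) 1).reverse))

-- ===== PORT B =====
-- one row of B's sweep: 'for i in range(w): if row[i] == 1: heights[i] = unit*j'
def pvBRow (w : Int) (j : Int) (row : List Int) (h : List Int) : List Int :=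
  (PySem.List.pyRange 0 w 1).foldl
    (fun h2 i => if PySem.List.pyGetD row i 0 == 1 then PySem.List.pySetD h2 i (unit * j) else h2) h

def get_heights_alt (map_ : List (List Int)) : List Int :=
  let w : Int := ((PySem.List.pyGetD map_ 0 []).length : Int)
  (PySem.List.enumerate map_ 0).foldl (fun h p => pvBRow w p.1 p.2 h)
    (List.replicate w.toNat 0)

-- ===== PRECONDITION & SPEC =====
-- Pre_ excludes the empty grid and ragged grids (a row shorter than the first row): there the
-- Python A raises IndexError except when an early break happens to skip the short row, and B
-- raises on every such grid.
def Pre_get_heights (map_ : List (List Int)) : Prop :=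
  map_ ≠ [] ∧ ∀ row ∈ map_, (map_.headD []).length ≤ row.length
instance (map_ : List (List Int)) : Decidable (Pre_get_heights map_) := by
  unfold Pre_get_heights; infer_instance

def pvWitness_get_heights : List (List Int) := [[0, 1], [1, 0]]

def Spec_get_heights (map_ : List (List Int)) (out : List Int) : Prop := out = get_heights_alt map_
instance (map_ : List (List Int)) (out : List Int) : Decidable (Spec_get_heights map_ out) := by
  unfold Spec_get_heights; infer_instance

-- ===== CLAIM (what is proved, stated in full; the proofs are below) =====
def Claim_equal_get_heights : Prop := ∀ (map_ : List (List Int)), Dom_get_heights map_ → Pre_get_heights map_ → Spec_get_heights map_ (get_heights map_)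

-- ===== LEMMAS AND PROOFS =====

-- the common forward-overwrite value of column k
def pvColF (map_ : List (List Int)) (k : Int) : Int :=
  (PySem.List.pyRange 0 (map_.length : Int) 1).foldl
    (fun acc j => if PySem.List.pyGetD (PySem.List.pyGetD map_ j []) k 0 == 1 then unit * j else acc) 0

-- A's reverse scan with break = forward overwrite fold
theorem pvA_rev (map_ : List (List Int)) (i : Int) (js : List Int) :
    pvAColLoop map_ i js.reverse =
      js.foldl (fun acc j =>
        if PySem.List.pyGetD (PySem.List.pyGetD map_ j []) i 0 == 1 then unit * j else acc) 0 := by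
  induction js using List.reverseRecOn with
  | nil => simp [pvAColLoop]
  | append_singleton l j ih =>
      rw [List.reverse_append, List.foldl_append]
      simp only [List.reverse_singleton, List.singleton_append, List.foldl_cons, List.foldl_nil,
        pvAColLoop]
      by_cases h : PySem.List.pyGetD (PySem.List.pyGetD map_ j []) i 0 == 1 <;> simp [h, ih]

theorem pvBRow_length (w : Int) (j : Int) (row h : List Int) :
    (pvBRow w j row h).length = h.length := by
  unfold pvBRow
  induction PySem.List.pyRange 0 w 1 generalizing h with
  | nil => rfl
  | cons i is ih =>
      simp only [List.foldl_cons]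
      rw [ih]
      by_cases hc : PySem.List.pyGetD row i 0 == 1 <;>
        simp [hc, PySem.List.length_pySetD]

theorem pvBRow_get (n : Nat) (j : Int) (row h : List Int) (hn : n ≤ h.length) (k : Nat) :
    (pvBRow (n : Int) j row h)[k]? =
      if k < n ∧ PySem.List.pyGetD row (k : Int) 0 == 1 then some (unit * j) else h[k]? := by
  induction n generalizing k with
  | zero => simp [pvBRow]
  | succ m ih =>
      have hm : m ≤ h.length := Nat.le_of_succ_le hn
      have hsplit : PySem.List.pyRange 0 ((m + 1 : Nat) : Int) 1
          = PySem.List.pyRange 0 (m : Int) 1 ++ [(m : Int)] := by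
        have := PySem.List.pyRange_one_succ_right (a := 0) (b := (m : Int)) (by positivity)
        push_cast
        push_cast at this
        exact this
      unfold pvBRow at *
      rw [hsplit, List.foldl_append]
      simp only [List.foldl_cons, List.foldl_nil]
      have hlen : (List.foldl (fun h2 i => if PySem.List.pyGetD row i 0 == 1 then PySem.List.pySetD h2 i (unit * j) else h2) h (PySem.List.pyRange 0 (m : Int) 1)).length = h.length := by
        have := pvBRow_length (m : Int) j row h
        unfold pvBRow at this
        exact this
      by_cases hc : PySem.List.pyGetD row ((m : Nat) : Int) 0 == 1
      · rw [if_pos hc, PySem.List.pySetD_natCast, List.getElem?_set]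
        by_cases hk : m = k
        · subst hk
          rw [if_pos rfl, hlen, if_pos (by omega), if_pos ⟨Nat.lt_succ_self m, hc⟩]
        · rw [if_neg hk, ih hm k]
          have hlt : k < m + 1 ↔ k < m := by omega
          simp only [hlt]
      · rw [if_neg hc, ih hm k]
        by_cases hk : m = k
        · subst hk
          rw [if_neg (fun h => lt_irrefl m h.1), if_neg (fun h => hc h.2)]
        · have hlt : k < m + 1 ↔ k < m := by omega
          simp only [hlt]

-- option-valued overwrite fold = some of the plain overwrite fold
theorem pvFold_some (c : Int → Bool) (v : Int → Int) (js : List Int) (x : Int) :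
    js.foldl (fun acc j => if c j then some (v j) else acc) (some x)
      = some (js.foldl (fun acc j => if c j then v j else acc) x) := by
  induction js generalizing x with
  | nil => rfl
  | cons j js ih =>
      simp only [List.foldl_cons]
      by_cases hc : c j <;> simp [hc, ih]

theorem pvOuter_length (w : Int) (ps : List (Int × List Int)) (h : List Int) :
    (ps.foldl (fun h p => pvBRow w p.1 p.2 h) h).length = h.length := by
  induction ps generalizing h with
  | nil => rfl
  | cons p ps ih => simp only [List.foldl_cons]; rw [ih, pvBRow_length]

theorem pvOuter_get (n : Nat) (ps : List (Int × List Int)) (h : List Int)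
    (hn : n ≤ h.length) (k : Nat) :
    (ps.foldl (fun h p => pvBRow (n : Int) p.1 p.2 h) h)[k]? =
      ps.foldl (fun acc p =>
        if k < n ∧ PySem.List.pyGetD p.2 (k : Int) 0 == 1 then some (unit * p.1) else acc) h[k]? := by
  induction ps generalizing h with
  | nil => rfl
  | cons p ps ih =>
      simp only [List.foldl_cons]
      rw [ih _ (by rw [pvBRow_length]; exact hn), pvBRow_get n p.1 p.2 h hn k]

theorem get_heights_eq_map (map_ : List (List Int)) :
    get_heights map_ =
      (PySem.List.pyRange 0 ((PySem.List.pyGetD map_ 0 []).length : Int) 1).map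
        (fun i => pvColF map_ i) := by
  unfold get_heights pvColF
  simp only []
  apply List.map_congr_left
  intro i _
  exact pvA_rev map_ i _

-- ===== VERDICT (by name: the statement is the Claim_ definition above) =====
theorem get_heights_spec : Claim_equal_get_heights := by
  intro map_ _ _
  unfold Spec_get_heights
  have hrep : (List.replicate ((((PySem.List.pyGetD map_ 0 []).length : Int)).toNat) (0 : Int)).length
      = (PySem.List.pyGetD map_ 0 []).length := by simp
  have hAlen : (get_heights map_).length = (PySem.List.pyGetD map_ 0 []).length := by
    rw [get_heights_eq_map]
    simp [PySem.List.length_pyRange_one]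
  have hBlen : (get_heights_alt map_).length = (PySem.List.pyGetD map_ 0 []).length := by
    unfold get_heights_alt
    simp only []
    rw [pvOuter_length]
    exact hrep
  apply List.ext_getElem?
  intro k
  by_cases hk : k < (PySem.List.pyGetD map_ 0 []).length
  · have hA : (get_heights map_)[k]? = some (pvColF map_ (k : Int)) := by
      rw [get_heights_eq_map, List.getElem?_map,
        PySem.List.getElem?_pyRange_one, if_pos (by simpa using hk)]
      simp
    have hB : (get_heights_alt map_)[k]? = some (pvColF map_ (k : Int)) := by
      unfold get_heights_alt
      simp only []
      rw [pvOuter_get ((PySem.List.pyGetD map_ 0 []).length) (PySem.List.enumerate map_ 0) _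
        (le_of_eq hrep.symm) k]
      rw [List.getElem?_replicate, if_pos (by simpa using hk)]
      rw [PySem.List.enumerate_eq_map_pyRange (d := [])]
      rw [List.foldl_map]
      simp only [hk, true_and]
      rw [pvFold_some (fun j => PySem.List.pyGetD (PySem.List.pyGetD map_ j []) (k : Int) 0 == 1)
        (fun j => unit * j) _ 0]
      rfl
    rw [hA, hB]
  · rw [List.getElem?_eq_none (by omega), List.getElem?_eq_none (by omega)]
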